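-- pv_equiv track=rewrite | github.com/iximiuz/algorithms | GoogleTechDevGuide/LongestSubsequence/solve.py | solve
-- ===== SOURCE A (Python) =====
-- from collections import defaultdict
--
-- def solve(seq, words):
--     index = defaultdict(list)
--     for pos, l in enumerate(seq):
--         index[l].append(pos)
--
--     for w in reversed(sorted(words)):
--         last_pos = -1
--         for pos, l in enumerate(w):
--             positions = [p for p in index[l] if p > last_pos]
--             if not positions:
--                 break
--             last_pos = positions[0]
--         else:
--             return w
--
--     return None
-- ===== SOURCE B (Python) =====
-- def solve(seq, words):
--     letters = set(seq)
--     for w in reversed(sorted(words)):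
--         if set(w) <= letters:
--             it = iter(seq)
--             if all(c in it for c in w):
--                 return w
--     return None
-- ===== Notes on version B (the rewrite author's own statement) =====
-- stated objective: alternative
-- what changed: Drops A's per-letter position index (a list it filters in full once per letter of every word) in favour of a letter-set short-circuit plus a direct single-pass two-pointer subsequence test over seq via Python's consumable-iterator idiom all(c in it for c in w).
import Mathlib
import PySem

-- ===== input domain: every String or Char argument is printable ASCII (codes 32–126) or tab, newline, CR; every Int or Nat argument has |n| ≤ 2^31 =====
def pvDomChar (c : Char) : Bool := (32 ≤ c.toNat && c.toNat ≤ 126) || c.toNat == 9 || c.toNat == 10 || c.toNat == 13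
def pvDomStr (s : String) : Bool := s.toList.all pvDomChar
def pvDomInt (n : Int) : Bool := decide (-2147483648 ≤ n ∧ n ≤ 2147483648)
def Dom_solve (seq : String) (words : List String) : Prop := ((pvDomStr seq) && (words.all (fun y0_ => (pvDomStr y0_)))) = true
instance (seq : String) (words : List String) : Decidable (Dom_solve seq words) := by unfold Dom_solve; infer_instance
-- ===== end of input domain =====

-- B replaces A's per-letter position index (filtered per letter of every word) by a direct
-- letter-set short-circuit plus a two-pointer subsequence scan of seq (consumable-iterator idiom).

-- ===== PORT A =====
-- index = defaultdict(list); for pos, l in enumerate(seq): index[l].append(pos)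
def pvIndexA (seq : List Char) : PySem.Dict Char (List Int) :=
  (PySem.List.enumerate seq 0).foldl (fun d pl => d.modify pl.2 [] (· ++ [pl.1])) PySem.Dict.empty

-- the inner 'for pos, l in enumerate(w) … else return w' loop of A, carrying last_pos
def pvCheckA (d : PySem.Dict Char (List Int)) : List Char → Int → Bool
  | [], _ => true
  | l :: rest, last =>
    match (d.getD l []).filter (fun p => decide (p > last)) with
    | [] => false
    | p0 :: _ => pvCheckA d rest p0

-- for w in reversed(sorted(words)): … return w / return None
def pvLoopA (d : PySem.Dict Char (List Int)) : List String → Option String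
  | [] => none
  | w :: ws => if pvCheckA d w.toList (-1) then some w else pvLoopA d ws

def solve (seq : String) (words : List String) : Option String :=
  pvLoopA (pvIndexA seq.toList) ((PySem.List.sorted words (fun w => w) false).reverse)

-- ===== PORT B =====
-- it = iter(seq); all(c in it for c in w)  — two-pointer scan, consuming the iterator
def pvIsSub : List Char → List Char → Bool
  | [], _ => true
  | _ :: _, [] => false
  | c :: w, x :: s => if x = c then pvIsSub w s else pvIsSub (c :: w) s

-- for w in reversed(sorted(words)): if set(w) <= letters: … return w / return None
def pvLoopB (seq : List Char) (letters : PySem.Set Char) : List String → Option String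
  | [] => none
  | w :: ws =>
    if PySem.Set.issubset (PySem.Set.ofList w.toList) letters then
      if pvIsSub w.toList seq then some w else pvLoopB seq letters ws
    else pvLoopB seq letters ws

def solve_alt (seq : String) (words : List String) : Option String :=
  pvLoopB seq.toList (PySem.Set.ofList seq.toList)
    ((PySem.List.sorted words (fun w => w) false).reverse)

-- ===== PRECONDITION & SPEC =====
def Spec_solve (seq : String) (words : List String) (out : Option String) : Prop := out = solve_alt seq words
instance (seq : String) (words : List String) (out : Option String) : Decidable (Spec_solve seq words out) := by unfold Spec_solve; infer_instance

-- ===== CLAIM (what is proved, stated in full; the proofs are below) =====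
def Claim_equal_solve : Prop := ∀ (seq : String) (words : List String), Dom_solve seq words → Spec_solve seq words (solve seq words)

-- ===== LEMMAS AND PROOFS =====

-- occurrence positions of c in s, numbered from i (what A's index stores per letter)
def pvOcc (i : Int) (s : List Char) (c : Char) : List Int :=
  match s with
  | [] => []
  | x :: t => if x = c then i :: pvOcc (i + 1) t c else pvOcc (i + 1) t c

-- pvCheckA with an abstract occurrence function (proof-side abstraction of the dict)
def pvCheckO (occ : Char → List Int) : List Char → Int → Bool
  | [], _ => true
  | l :: rest, last =>
    match (occ l).filter (fun p => decide (p > last)) with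
    | [] => false
    | p0 :: _ => pvCheckO occ rest p0

lemma pvCheckA_eq_checkO (d : PySem.Dict Char (List Int)) (w : List Char) (last : Int) :
    pvCheckA d w last = pvCheckO (fun c => d.getD c []) w last := by
  induction w generalizing last with
  | nil => rfl
  | cons l rest ih =>
    simp only [pvCheckA, pvCheckO]
    cases (d.getD l []).filter (fun p => decide (p > last)) with
    | nil => rfl
    | cons p0 _ => exact ih p0

lemma pvIndexA_getD (s : List Char) (c : Char) :
    (pvIndexA s).getD c [] = pvOcc 0 s c := by
  have h : ∀ (i : Int) (d : PySem.Dict Char (List Int)),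
      ((PySem.List.enumerate s i).foldl (fun d pl => d.modify pl.2 [] (· ++ [pl.1])) d).getD c []
        = d.getD c [] ++ pvOcc i s c := by
    induction s with
    | nil => intro i d; simp [PySem.List.enumerate_nil, pvOcc]
    | cons x t ih =>
      intro i d
      rw [PySem.List.enumerate_cons, List.foldl_cons, ih]
      by_cases hx : x = c
      · subst hx
        rw [PySem.Dict.getD_modify_self]
        simp [pvOcc]
      · rw [PySem.Dict.getD_modify_of_ne _ _ _ (Ne.symm hx)]
        simp [pvOcc, hx]
  simpa using h 0 PySem.Dict.empty

lemma pvOcc_mem_ge (i : Int) (s : List Char) (c : Char) (p : Int) (hp : p ∈ pvOcc i s c) : i ≤ p := by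
  induction s generalizing i with
  | nil => simp [pvOcc] at hp
  | cons x t ih =>
    simp only [pvOcc] at hp
    by_cases hx : x = c
    · simp [hx] at hp
      rcases hp with h | h
      · omega
      · have := ih (i + 1) h; omega
    · simp [hx] at hp
      have := ih (i + 1) hp; omega

-- dropping the head position once last_pos has passed it
lemma pvCheckO_shift (x : Char) (t : List Char) (w : List Char) (i last : Int) (h : i ≤ last) :
    pvCheckO (pvOcc i (x :: t)) w last = pvCheckO (pvOcc (i + 1) t) w last := by
  induction w generalizing last with
  | nil => rfl
  | cons c rest ih =>
    simp only [pvCheckO]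
    have hfilt : (pvOcc i (x :: t) c).filter (fun p => decide (p > last))
        = (pvOcc (i + 1) t c).filter (fun p => decide (p > last)) := by
      by_cases hx : x = c
      · simp [pvOcc, hx, List.filter_cons]
        omega
      · simp [pvOcc, hx]
    rw [hfilt]
    cases hF : (pvOcc (i + 1) t c).filter (fun p => decide (p > last)) with
    | nil => rfl
    | cons p0 rest' =>
      have hp0 : p0 ∈ pvOcc (i + 1) t c := by
        have : p0 ∈ (pvOcc (i + 1) t c).filter (fun p => decide (p > last)) := by
          rw [hF]; exact List.mem_cons_self
        exact List.mem_of_mem_filter this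
      exact ih p0 (by have := pvOcc_mem_ge (i + 1) t c p0 hp0; omega)

-- A's greedy scan over the position index equals B's two-pointer subsequence test
lemma pvCheckO_eq_isSub (s : List Char) (w : List Char) (i last : Int) (h : last < i) :
    pvCheckO (pvOcc i s) w last = pvIsSub w s := by
  induction s generalizing w i last with
  | nil =>
    cases w with
    | nil => rfl
    | cons c rest => simp [pvCheckO, pvOcc, pvIsSub]
  | cons x t ih =>
    cases w with
    | nil => rfl
    | cons c rest =>
      by_cases hx : x = c
      · subst hx
        simp only [pvCheckO, pvIsSub]
        have : (pvOcc i (x :: t) x).filter (fun p => decide (p > last))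
            = i :: (pvOcc (i + 1) t x).filter (fun p => decide (p > last)) := by
          simp [pvOcc, List.filter_cons]
          omega
        rw [this]
        show pvCheckO (pvOcc i (x :: t)) rest i = pvIsSub rest t
        rw [pvCheckO_shift x t rest i i le_rfl]
        exact ih rest (i + 1) i (by omega)
      · simp only [pvCheckO, pvIsSub, if_neg hx]
        have hocc : pvOcc i (x :: t) c = pvOcc (i + 1) t c := by simp [pvOcc, hx]
        rw [hocc]
        have hrhs := ih (c :: rest) (i + 1) last (by omega)
        simp only [pvCheckO] at hrhs
        cases hF : (pvOcc (i + 1) t c).filter (fun p => decide (p > last)) with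
        | nil => rw [hF] at hrhs; exact hrhs
        | cons p0 rest' =>
          rw [hF] at hrhs
          have hp0 : p0 ∈ pvOcc (i + 1) t c := by
            have : p0 ∈ (pvOcc (i + 1) t c).filter (fun p => decide (p > last)) := by
              rw [hF]; exact List.mem_cons_self
            exact List.mem_of_mem_filter this
          show pvCheckO (pvOcc i (x :: t)) rest p0 = pvIsSub (c :: rest) t
          rw [pvCheckO_shift x t rest i p0
            (by have := pvOcc_mem_ge (i + 1) t c p0 hp0; omega)]
          exact hrhs

lemma pvCheckA_eq_isSub (s w : List Char) :
    pvCheckA (pvIndexA s) w (-1) = pvIsSub w s := by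
  rw [pvCheckA_eq_checkO]
  have : (fun c => (pvIndexA s).getD c []) = pvOcc 0 s := by
    funext c; exact pvIndexA_getD s c
  rw [this]
  exact pvCheckO_eq_isSub s w 0 (-1) (by omega)

-- a word using a letter absent from seq is never a subsequence of seq
lemma pvIsSub_false_of_missing (s w : List Char) (c : Char) (hc : c ∈ w) (hs : c ∉ s) :
    pvIsSub w s = false := by
  induction s generalizing w with
  | nil =>
    cases w with
    | nil => simp at hc
    | cons a w' => rfl
  | cons x t ih =>
    cases w with
    | nil => simp at hc
    | cons a w' =>
      have hct : c ∉ t := fun h => hs (List.mem_cons_of_mem x h)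
      have hcx : c ≠ x := fun h => hs (h ▸ List.mem_cons_self)
      simp only [pvIsSub]
      by_cases hax : x = a
      · have hcw' : c ∈ w' :=
          (List.mem_cons.mp hc).resolve_left (fun h => hcx (h.trans hax.symm))
        simp only [if_pos hax]
        exact ih w' hcw' hct
      · simp only [if_neg hax]
        exact ih (a :: w') hc hct

lemma pvLoopA_eq_loopB (s : List Char) (ws : List String) :
    pvLoopA (pvIndexA s) ws = pvLoopB s (PySem.Set.ofList s) ws := by
  induction ws with
  | nil => rfl
  | cons w rest ih =>
    simp only [pvLoopA, pvLoopB, pvCheckA_eq_isSub, ih]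
    by_cases hg : PySem.Set.issubset (PySem.Set.ofList w.toList) (PySem.Set.ofList s) = true
    · rw [if_pos hg]
    · rw [if_neg hg]
      have : ∃ c ∈ w.toList, c ∉ s := by
        by_contra h
        push_neg at h
        exact hg ((PySem.Set.issubset_iff _ _).mpr (fun x hx =>
          (PySem.Set.mem_ofList s x).mpr (h x ((PySem.Set.mem_ofList w.toList x).mp hx))))
      obtain ⟨c, hc, hcs⟩ := this
      rw [pvIsSub_false_of_missing s w.toList c hc hcs]
      simp

-- ===== VERDICT (by name: the statement is the Claim_ definition above) =====
theorem solve_spec : Claim_equal_solve := by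
  intro seq words _
  unfold Spec_solve solve solve_alt
  exact pvLoopA_eq_loopB seq.toList _
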